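-- pv_equiv track=rewrite | github.com/Carmen-Carmen/coursera_bioinformatics | Bioinformatics_I_finding_hidden_messages_in_DNA/week_3/week3.py | score_motif1
-- ===== SOURCE A (Python) =====
-- def score_motif1(motifs):
--     score = 0
--     for i in range(len(motifs[0])):
--         temp = []
--         for motif in motifs:
--             temp.append(motif[i])
--
--         score += len(motifs) - max(count_bases(temp).values())
--
--     return score
--
-- def count_bases(bases_arr):
--     counts = {
--         "A" : 0,
--         "T" : 0,
--         "C" : 0,
--         "G" : 0
--     }
--     for base in bases_arr:
--         counts[base] += 1
--
--     return counts
-- ===== SOURCE B (Python) =====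
-- def score_motif1(motifs):
--     n = len(motifs)
--     total = 0
--     for i in range(len(motifs[0])):
--         col = sorted(m[i] for m in motifs)
--         best = 0
--         run = 0
--         prev = None
--         for ch in col:
--             run = run + 1 if ch == prev else 1
--             prev = ch
--             if run > best:
--                 best = run
--         total += n - best
--     return total
-- ===== Notes on version B (the rewrite author's own statement) =====
-- stated objective: alternative
-- what changed: B discards A's per-column fixed-key count dict entirely: it sorts each column and finds the longest run of equal characters in one scan, summing n minus that run length; a sorted column's longest run equals the most frequent base's count.
import Mathlib
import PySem

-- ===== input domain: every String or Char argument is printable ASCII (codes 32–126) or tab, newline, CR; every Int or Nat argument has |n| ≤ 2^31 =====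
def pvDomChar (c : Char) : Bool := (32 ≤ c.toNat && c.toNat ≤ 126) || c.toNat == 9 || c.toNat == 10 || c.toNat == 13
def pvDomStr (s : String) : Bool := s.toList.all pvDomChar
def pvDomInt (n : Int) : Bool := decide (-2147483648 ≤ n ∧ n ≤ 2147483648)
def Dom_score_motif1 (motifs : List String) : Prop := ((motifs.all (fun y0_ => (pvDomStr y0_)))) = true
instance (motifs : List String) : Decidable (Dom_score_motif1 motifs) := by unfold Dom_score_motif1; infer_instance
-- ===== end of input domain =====

-- B replaces A's per-column dict counting with sort-then-run-scan: each column is sorted and its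
-- longest run of equal characters found in one scan (alternative algorithm, same asymptotic cost).


-- the literal dict {"A":0,"T":0,"C":0,"G":0} A starts a column count from
def initCounts : PySem.Dict Char Int :=
  ((((PySem.Dict.empty).insert 'A' 0).insert 'T' 0).insert 'C' 0).insert 'G' 0

-- max(d.values()); the values list is never empty on admitted inputs, the 0 default is a totality guard only
def pyMaxValues (d : PySem.Dict Char Int) : Int :=
  (PySem.List.max? d.values (fun x => x)).getD 0

-- ===== PORT A =====
def count_bases (bases_arr : List Char) : PySem.Dict Char Int :=
  bases_arr.foldl (fun counts base => counts.modify base 0 (· + 1)) initCounts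

def score_motif1 (motifs : List String) : Int :=
  match PySem.List.pyGet? motifs 0 with
  | none => 0   -- unreachable under Pre_ (Python raises IndexError on motifs[0])
  | some m0 =>
    (PySem.List.pyRange 0 (m0.toList.length : Int)).foldl
      (fun score i =>
        let temp := motifs.foldl (fun t motif => t ++ [(PySem.List.pyGet? motif.toList i).getD ' ']) []
        score + ((motifs.length : Int) - pyMaxValues (count_bases temp))) 0

-- ===== PORT B =====
-- one step of Source B's run scan; state is (best, run, prev)
def runStep (st : Int × Int × Option Char) (ch : Char) : Int × Int × Option Char :=
  let run := if some ch == st.2.2 then st.2.1 + 1 else 1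
  (if run > st.1 then run else st.1, run, some ch)

def score_motif1_alt (motifs : List String) : Int :=
  let n : Int := motifs.length
  match PySem.List.pyGet? motifs 0 with
  | none => 0   -- unreachable under Pre_ (Python raises IndexError on motifs[0])
  | some m0 =>
    (PySem.List.pyRange 0 (m0.toList.length : Int)).foldl
      (fun total i =>
        let col := PySem.List.sorted
          (motifs.map (fun m => (PySem.List.pyGet? m.toList i).getD ' ')) (fun x => x) false
        let st := col.foldl runStep ((0 : Int), (0 : Int), (none : Option Char))
        total + (n - st.1)) 0

-- ===== PRECONDITION & SPEC =====
-- Pre_ is exactly where the Python A returns: a nonempty motif list (else IndexError on motifs[0]),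
-- every motif at least as long as the first (else IndexError on motif[i]), and every base read
-- (the first len(motifs[0]) chars of each motif) one of A/T/C/G (else KeyError in count_bases).
def Pre_score_motif1 (motifs : List String) : Prop :=
  motifs ≠ [] ∧ ∀ m ∈ motifs, motifs.headI.toList.length ≤ m.toList.length ∧
    ((m.toList.take motifs.headI.toList.length).all
      (fun c => c == 'A' || c == 'T' || c == 'C' || c == 'G')) = true
instance (motifs : List String) : Decidable (Pre_score_motif1 motifs) := by
  unfold Pre_score_motif1; infer_instance

def pvWitness_score_motif1 : List String := ["ACGT", "ATGT", "ACCA"]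

def Spec_score_motif1 (motifs : List String) (out : Int) : Prop := out = score_motif1_alt motifs
instance (motifs : List String) (out : Int) : Decidable (Spec_score_motif1 motifs out) := by
  unfold Spec_score_motif1; infer_instance

-- ===== CLAIM (what is proved, stated in full; the proofs are below) =====
def Claim_equal_score_motif1 : Prop := ∀ (motifs : List String), Dom_score_motif1 motifs → Pre_score_motif1 motifs → Spec_score_motif1 motifs (score_motif1 motifs)

-- ===== LEMMAS AND PROOFS =====

-- the character both programs read at row `motif`, column `i`
def chAt (motif : String) (i : Int) : Char := (PySem.List.pyGet? motif.toList i).getD ' '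

-- max of the four base counts of a column, as an Int
def mx4 (l : List Char) : Int :=
  max (max (max (l.count 'A' : Int) (l.count 'T' : Int)) (l.count 'C' : Int)) (l.count 'G' : Int)

-- shape of inputs all of whose characters are bases
def allACGT (l : List Char) : Prop := ∀ x ∈ l, x = 'A' ∨ x = 'T' ∨ x = 'C' ∨ x = 'G'

-- A's count dict on an all-ACGT column, in closed form (generalized over the running values)
lemma count_bases_gen (l : List Char) : allACGT l → ∀ (a t c g : Int),
    l.foldl (fun d b => d.modify b 0 (· + 1))
        (PySem.Dict.mk [('A', a), ('T', t), ('C', c), ('G', g)]) =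
      PySem.Dict.mk [('A', a + l.count 'A'), ('T', t + l.count 'T'),
                     ('C', c + l.count 'C'), ('G', g + l.count 'G')] := by
  induction l with
  | nil => intro _ a t c g; simp
  | cons x xs ih =>
    intro hl a t c g
    have hx := hl x (List.mem_cons_self)
    have hxs : allACGT xs := fun y hy => hl y (List.mem_cons_of_mem _ hy)
    rcases hx with rfl | rfl | rfl | rfl <;>
      simp only [List.foldl_cons,
        show ∀ v : Int, (PySem.Dict.mk [('A', v), ('T', t), ('C', c), ('G', g)]).modify 'A' 0 (· + 1)
          = PySem.Dict.mk [('A', v + 1), ('T', t), ('C', c), ('G', g)] from fun _ => rfl,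
        show ∀ v : Int, (PySem.Dict.mk [('A', a), ('T', v), ('C', c), ('G', g)]).modify 'T' 0 (· + 1)
          = PySem.Dict.mk [('A', a), ('T', v + 1), ('C', c), ('G', g)] from fun _ => rfl,
        show ∀ v : Int, (PySem.Dict.mk [('A', a), ('T', t), ('C', v), ('G', g)]).modify 'C' 0 (· + 1)
          = PySem.Dict.mk [('A', a), ('T', t), ('C', v + 1), ('G', g)] from fun _ => rfl,
        show ∀ v : Int, (PySem.Dict.mk [('A', a), ('T', t), ('C', c), ('G', v)]).modify 'G' 0 (· + 1)
          = PySem.Dict.mk [('A', a), ('T', t), ('C', c), ('G', v + 1)] from fun _ => rfl,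
        ih hxs] <;>
      (simp [PySem.Dict.mk.injEq]; all_goals omega)

-- A's per-column value on an all-ACGT column is the max of the four counts
lemma a_col_val (l : List Char) (h : allACGT l) :
    pyMaxValues (count_bases l) = mx4 l := by
  have hcb : count_bases l =
      PySem.Dict.mk [('A', (l.count 'A' : Int)), ('T', l.count 'T'),
                     ('C', l.count 'C'), ('G', l.count 'G')] := by
    have := count_bases_gen l h 0 0 0 0
    simp only [zero_add] at this
    exact this
  rw [hcb]
  unfold pyMaxValues
  rw [show (PySem.Dict.mk [('A', (l.count 'A' : Int)), ('T', l.count 'T'),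
        ('C', l.count 'C'), ('G', l.count 'G')]).values =
      [(l.count 'A' : Int), l.count 'T', l.count 'C', l.count 'G'] from rfl]
  rw [PySem.List.max?_id_cons]
  simp [List.foldl, mx4]

-- appending one base to a column raises the max-of-four to cover its new count
lemma mx4_append (l : List Char) (c : Char) (hc : c = 'A' ∨ c = 'T' ∨ c = 'C' ∨ c = 'G') :
    mx4 (l ++ [c]) = max (mx4 l) ((l.count c : Int) + 1) := by
  rcases hc with rfl | rfl | rfl | rfl <;>
    (simp [mx4, List.count_append]; all_goals omega)

-- trailing-run count of a column: count of its last element (0 for the empty column)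
def trailI (l : List Char) : Int :=
  match l.getLast? with
  | none => 0
  | some c => (l.count c : Int)

-- the run scan of a sorted all-ACGT column computes (max count, trailing count, last element)
lemma scan_sorted (l : List Char) (hs : l.Pairwise (· ≤ ·)) (h : allACGT l) :
    l.foldl runStep ((0 : Int), (0 : Int), (none : Option Char)) =
      (mx4 l, trailI l, l.getLast?) := by
  induction l using List.reverseRecOn with
  | nil => simp [mx4, trailI]
  | append_singleton s c ih =>
    have hps : s.Pairwise (· ≤ ·) := (List.pairwise_append.mp hs).1
    have hle : ∀ x ∈ s, x ≤ c := by
      intro x hx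
      exact (List.pairwise_append.mp hs).2.2 x hx c (List.mem_singleton_self c)
    have hcA : c = 'A' ∨ c = 'T' ∨ c = 'C' ∨ c = 'G' :=
      h c (List.mem_append_right _ (List.mem_singleton_self c))
    have hsA : allACGT s := fun y hy => h y (List.mem_append_left _ hy)
    rw [List.foldl_append, ih hps hsA, List.foldl_cons, List.foldl_nil]
    have hrun : (if some c == (mx4 s, trailI s, s.getLast?).2.2 then trailI s + 1 else 1) =
        (s.count c : Int) + 1 := by
      rcases hlast : s.getLast? with _ | d
      · have : s = [] := List.getLast?_eq_none_iff.mp hlast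
        subst this; simp
      · by_cases hcd : c = d
        · subst hcd
          simp [trailI, hlast]
        · have hnotmem : c ∉ s := by
            intro hcs
            have hne : s ≠ [] := by rintro rfl; simp at hcs
            have h1 : c ≤ s.getLast hne := hps.rel_getLast hcs
            have h2 : s.getLast hne = d := by
              rw [List.getLast?_eq_some_getLast hne] at hlast
              exact Option.some.inj hlast
            have h3 : s.getLast hne ≤ c := hle _ (List.getLast_mem hne)
            exact hcd (le_antisymm (h2 ▸ h1) (h2 ▸ h3))
          simp [List.count_eq_zero_of_not_mem hnotmem, hcd]
    have hcnt : (s ++ [c]).count c = s.count c + 1 := by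
      simp [List.count_append]
    have hcle : (s.count c : Int) ≤ mx4 s := by
      rcases hcA with rfl | rfl | rfl | rfl <;> (unfold mx4; omega)
    simp only [runStep, hrun]
    rw [mx4_append s c hcA]
    simp only [Prod.mk.injEq]
    refine ⟨by split_ifs with hgt <;> omega,
      by simp only [trailI, List.getLast?_concat, hcnt]; push_cast; ring,
      by simp⟩

-- a permutation preserves mx4 (sorted column ↔ original column)
lemma mx4_perm (l l' : List Char) (hp : l.Perm l') : mx4 l = mx4 l' := by
  simp [mx4, hp.count_eq]

-- B's per-column value equals A's on an all-ACGT column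
lemma col_val_eq (col : List Char) (h : allACGT col) :
    (PySem.List.sorted col (fun x => x) false).foldl runStep
        ((0 : Int), (0 : Int), (none : Option Char)) =
      (pyMaxValues (count_bases col),
        trailI (PySem.List.sorted col (fun x => x) false),
        (PySem.List.sorted col (fun x => x) false).getLast?) := by
  have hperm : (PySem.List.sorted col (fun x => x) false).Perm col :=
    PySem.List.sorted_perm col (fun x => x) false
  have hsorted : (PySem.List.sorted col (fun x => x) false).Pairwise (· ≤ ·) :=
    PySem.List.sorted_pairwise col (fun x => x)
  have hA : allACGT (PySem.List.sorted col (fun x => x) false) := fun x hx =>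
    h x (hperm.mem_iff.mp hx)
  rw [scan_sorted _ hsorted hA, mx4_perm _ _ hperm, a_col_val col h]

-- ===== VERDICT (by name: the statement is the Claim_ definition above) =====
theorem score_motif1_spec : Claim_equal_score_motif1 := by
  intro motifs _ hpre
  unfold Spec_score_motif1 score_motif1 score_motif1_alt
  cases h0 : PySem.List.pyGet? motifs 0 with
  | none => rfl
  | some m0 =>
    simp only []
    apply PySem.List.foldl_congr_mem
    intro acc i hi
    obtain ⟨hi0, hiL⟩ := (PySem.List.mem_pyRange_one).mp hi
    -- the column read at i
    have htemp : motifs.foldl (fun t motif => t ++ [(PySem.List.pyGet? motif.toList i).getD ' ']) [] =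
        motifs.map (fun m => (PySem.List.pyGet? m.toList i).getD ' ') := by
      rw [PySem.List.foldl_append_singleton_eq_map]
      simp
    have hhead : motifs.headI = m0 := by
      cases motifs with
      | nil => simp [PySem.List.pyGet?] at h0
      | cons a l =>
        rw [show (0 : Int) = ((0 : Nat) : Int) from rfl, PySem.List.pyGet?_natCast] at h0
        simpa using h0
    have hcol : allACGT (motifs.map (fun m => (PySem.List.pyGet? m.toList i).getD ' ')) := by
      intro x hx
      rcases List.mem_map.mp hx with ⟨m, hm, rfl⟩
      obtain ⟨hlen, hall⟩ := hpre.2 m hm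
      rw [hhead] at hlen hall
      have hik : i.toNat < m.toList.length := by omega
      have hget : PySem.List.pyGet? m.toList i = m.toList[i.toNat]? := by
        rw [show i = (i.toNat : Int) by omega]
        exact PySem.List.pyGet?_natCast m.toList i.toNat
      rw [hget, List.getElem?_eq_getElem hik, Option.getD_some]
      have hmem : m.toList[i.toNat] ∈ m.toList.take m0.toList.length := by
        rw [List.mem_take_iff_getElem]
        exact ⟨i.toNat, by omega, rfl⟩
      have h4 := List.all_eq_true.mp hall _ hmem
      simp only [Bool.or_eq_true, beq_iff_eq] at h4
      tauto
    rw [htemp, col_val_eq _ hcol]
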